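-- pv_equiv track=rewrite | github.com/herenever/Baekjoon-Algorithm | 백준/boj1074.py | find
-- ===== SOURCE A (Python) =====
-- def find(r,c,n):
--     if n == 1:
--         if r==0 and c == 0:
--             return 0
--         elif r==0 and c == 1:
--             return 1
--         elif r == 1 and c == 0:
--             return 2
--         else:
--             return 3
--     if r<(2**n)//2 and c<(2**n)//2:
--         return find(r,c,n-1)
--     elif r<(2**n)//2 and c>=(2**n)//2:
--         return find(r,c-((2**n)//2),n-1) + (4**(n-1))
--     elif r>=(2**n)//2 and c<(2**n)//2:
--         return find(r-((2**n)//2),c,n-1) + 2*(4**(n-1))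
--     else:
--         return find(r-((2**n)//2),c-((2**n)//2),n-1) + 3*(4**(n-1))
-- ===== SOURCE B (Python) =====
-- def find(r, c, n):
--     # Iterative: walk the quadrant bits from the top level down, accumulating
--     # the Z-order index incrementally (no repeated big-power computations).
--     acc = 0
--     for k in range(n - 1, 0, -1):
--         half = 1 << k
--         q = 0
--         if r >= half:
--             r -= half
--             q += 2
--         if c >= half:
--             c -= half
--             q += 1
--         acc = 4 * acc + q
--     if r == 0 and c == 0:
--         b = 0
--     elif r == 0 and c == 1:
--         b = 1
--     elif r == 1 and c == 0:
--         b = 2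
--     else:
--         b = 3
--     return 4 * acc + b
-- ===== Notes on version B (the rewrite author's own statement) =====
-- stated objective: faster
-- what changed: Replaces A's recursive quadrant descent, which recomputes the big powers 2**n and 4**(n-1) at every level, with a single iterative loop over the bit levels that accumulates the Z-order index incrementally (acc = 4*acc + quadrant).
import Mathlib
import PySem

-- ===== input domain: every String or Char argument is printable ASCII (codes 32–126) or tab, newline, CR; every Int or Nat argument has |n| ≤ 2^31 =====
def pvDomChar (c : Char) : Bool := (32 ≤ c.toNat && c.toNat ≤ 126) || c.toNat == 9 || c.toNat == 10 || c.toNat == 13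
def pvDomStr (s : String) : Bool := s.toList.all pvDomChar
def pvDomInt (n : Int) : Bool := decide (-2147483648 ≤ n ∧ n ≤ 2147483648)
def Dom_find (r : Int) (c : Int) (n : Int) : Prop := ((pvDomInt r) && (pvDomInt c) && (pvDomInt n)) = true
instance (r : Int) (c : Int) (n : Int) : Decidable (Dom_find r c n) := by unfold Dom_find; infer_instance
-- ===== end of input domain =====

-- B replaces A's recursive quadrant descent (which recomputes 2**n and 4**(n-1)
-- at every level) by one iterative loop over the bit levels accumulating the
-- index incrementally; objective: faster.

-- ===== PORT A =====
-- Fuel = n.toNat mirrors the recursion depth: the Python recursion decreases n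
-- by 1 each call and only returns (via the n == 1 base case) when the initial
-- n is ≥ 1; for n ≤ 0 Python never returns (outside Pre_), fuel 0 returns 0.
-- '(2**n)//2' is ported as '(2 ^ n : Int) / 2' on the fuel (= n on Pre_); for
-- the positive dividend and divisor here Lean's '/' equals Python's '//'.
def findA_go (r : Int) (c : Int) : Nat → Int
  | 0 => 0
  | 1 =>
    if r = 0 ∧ c = 0 then 0
    else if r = 0 ∧ c = 1 then 1
    else if r = 1 ∧ c = 0 then 2
    else 3
  | m + 2 =>
    let half : Int := (2 ^ (m + 2) : Int) / 2
    if r < half ∧ c < half then findA_go r c (m + 1)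
    else if r < half ∧ c ≥ half then findA_go r (c - half) (m + 1) + 4 ^ (m + 1)
    else if r ≥ half ∧ c < half then findA_go (r - half) c (m + 1) + 2 * 4 ^ (m + 1)
    else findA_go (r - half) (c - half) (m + 1) + 3 * 4 ^ (m + 1)

def find (r : Int) (c : Int) (n : Int) : Int := findA_go r c n.toNat

-- ===== PORT B =====
-- Loop body of Source B: one level k, half = 1 << k (k ≥ 1 inside the range, so
-- '2 ^ k.toNat' is exact), quadrant q, acc = 4*acc + q.
def stepB (st : Int × Int × Int) (k : Int) : Int × Int × Int :=
  let half : Int := 2 ^ k.toNat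
  let rq := if st.1 ≥ half then (st.1 - half, (2 : Int)) else (st.1, 0)
  let cq := if st.2.1 ≥ half then (st.2.1 - half, rq.2 + 1) else (st.2.1, rq.2)
  (rq.1, cq.1, 4 * st.2.2 + cq.2)

-- Final if/elif table of Source B.
def baseB (r : Int) (c : Int) : Int :=
  if r = 0 ∧ c = 0 then 0
  else if r = 0 ∧ c = 1 then 1
  else if r = 1 ∧ c = 0 then 2
  else 3

def find_alt (r : Int) (c : Int) (n : Int) : Int :=
  let st := (PySem.List.pyRange (n - 1) 0 (-1)).foldl stepB (r, c, 0)
  4 * st.2.2 + baseB st.1 st.2.1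

-- ===== PRECONDITION & SPEC =====
-- For n ≤ 0 the Python A recurses forever (RecursionError); A returns exactly when n ≥ 1.
def Pre_find (r : Int) (c : Int) (n : Int) : Prop := 1 ≤ n
instance (r : Int) (c : Int) (n : Int) : Decidable (Pre_find r c n) := by unfold Pre_find; infer_instance
def pvWitness_find : Int × Int × Int := (2, 5, 3)

def Spec_find (r : Int) (c : Int) (n : Int) (out : Int) : Prop := out = find_alt r c n
instance (r : Int) (c : Int) (n : Int) (out : Int) : Decidable (Spec_find r c n out) := by unfold Spec_find; infer_instance

-- ===== CLAIM (what is proved, stated in full; the proofs are below) =====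
def Claim_equal_find : Prop := ∀ (r : Int) (c : Int) (n : Int), Dom_find r c n → Pre_find r c n → Spec_find r c n (find r c n)

-- ===== LEMMAS AND PROOFS =====

-- Loop invariant: running B's loop for the levels m, m-1, …, 1 and finishing
-- with the base table equals A's recursive descent at depth m+1, shifted by acc.
theorem loopB_eq (m : Nat) : ∀ (r c acc : Int),
    (4 * ((PySem.List.pyRange (m : Int) 0 (-1)).foldl stepB (r, c, acc)).2.2
      + baseB ((PySem.List.pyRange (m : Int) 0 (-1)).foldl stepB (r, c, acc)).1
              ((PySem.List.pyRange (m : Int) 0 (-1)).foldl stepB (r, c, acc)).2.1)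
    = 4 * acc * 4 ^ m + findA_go r c (m + 1) := by
  induction m with
  | zero =>
    intro r c acc
    rw [PySem.List.pyRange_neg_one_eq_nil (by norm_num)]
    simp [findA_go, baseB]
    ring
  | succ m ih =>
    intro r c acc
    rw [show ((m + 1 : Nat) : Int) = (m : Int) + 1 by push_cast; ring,
        PySem.List.pyRange_neg_one_cons (by positivity)]
    have hstep : stepB (r, c, acc) ((m : Int) + 1) =
        (if r ≥ 2 ^ (m + 1) then r - 2 ^ (m + 1) else r,
         if c ≥ 2 ^ (m + 1) then c - 2 ^ (m + 1) else c,
         4 * acc + ((if r ≥ 2 ^ (m + 1) then (2:Int) else 0)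
                    + (if c ≥ 2 ^ (m + 1) then (1:Int) else 0))) := by
      have hk : (((m : Int) + 1)).toNat = m + 1 := by omega
      simp only [stepB, hk]
      split_ifs <;> simp
    have hhalf : ((2 ^ (m + 2) : Int)) / 2 = 2 ^ (m + 1) := by
      rw [pow_succ]; omega
    simp only [List.foldl_cons, show (m : Int) + 1 - 1 = (m : Int) by ring, hstep, ih]
    show _ = 4 * acc * 4 ^ (m + 1) + findA_go r c (m + 2)
    simp only [findA_go, hhalf]
    by_cases hr : r ≥ 2 ^ (m + 1) <;> by_cases hc : c ≥ 2 ^ (m + 1)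
    · rw [if_pos hr, if_pos hc, if_pos hr, if_pos hc,
          if_neg (fun h => absurd h.1 (not_lt.mpr hr)),
          if_neg (fun h => absurd h.1 (not_lt.mpr hr)),
          if_neg (fun h => absurd h.2 (not_lt.mpr hc))]
      ring
    · rw [if_pos hr, if_neg hc, if_pos hr, if_neg hc,
          if_neg (fun h => absurd h.1 (not_lt.mpr hr)),
          if_neg (fun h => absurd h.1 (not_lt.mpr hr)),
          if_pos ⟨hr, lt_of_not_ge hc⟩]
      ring
    · rw [if_neg hr, if_pos hc, if_neg hr, if_pos hc,
          if_neg (fun h => absurd h.2 (not_lt.mpr hc)),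
          if_pos ⟨lt_of_not_ge hr, hc⟩]
      ring
    · rw [if_neg hr, if_neg hc, if_neg hr, if_neg hc,
          if_pos ⟨lt_of_not_ge hr, lt_of_not_ge hc⟩]
      ring

theorem find_eq_alt (r c n : Int) (hn : 1 ≤ n) : find r c n = find_alt r c n := by
  have hm : ((n - 1).toNat : Int) = n - 1 := by omega
  have hN : n.toNat = (n - 1).toNat + 1 := by omega
  unfold find find_alt
  have h := loopB_eq (n - 1).toNat r c 0
  rw [hm] at h
  rw [h, hN]
  ring

-- ===== VERDICT (by name: the statement is the Claim_ definition above) =====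
theorem find_spec : Claim_equal_find := by
  intro r c n _ hpre
  unfold Spec_find
  exact find_eq_alt r c n hpre
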